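-- pv_equiv track=rewrite | github.com/uselesslyuseful/category-__ | classes.py | correct_destination
-- ===== SOURCE A (Python) =====
-- from collections import Counter
--
-- def correct_destination(analysis_data, ATTRIBUTES, station_num):
--     factor_list = []
--     station_list = []
--     for factor in analysis_data:
--         for station, properties in ATTRIBUTES.items():
--             for property in properties:
--                 if factor in properties[property]:
--                     factor_list.append(station)
--     station_counts = Counter(factor_list)
--     for i in range(station_num):
--         station_list.append(station_counts[list(station_counts.keys())[i]])
--     return station_list
-- ===== SOURCE B (Python) =====
-- def correct_destination(analysis_data, ATTRIBUTES, station_num):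
--     # Reverse index built once: factor value -> stations listed once per property containing it.
--     index = {}
--     for station, properties in ATTRIBUTES.items():
--         for values in properties.values():
--             for v in dict.fromkeys(values):
--                 index.setdefault(v, []).append(station)
--     # One dict lookup per analysed factor; totals keeps first-appearance order.
--     totals = {}
--     for factor in analysis_data:
--         for station in index.get(factor, ()):
--             totals[station] = totals.get(station, 0) + 1
--     counts = list(totals.values())
--     return [counts[i] for i in range(station_num)]
-- ===== Notes on version B (the rewrite author's own statement) =====
-- stated objective: faster
-- what changed: B builds a reverse index factor->stations once and then does one dict lookup per analysed factor, reading the ordered counts list once, instead of A's rescan of every station/property/value list for every factor and A's re-materialisation of list(keys()) for every output index.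
import Mathlib
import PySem

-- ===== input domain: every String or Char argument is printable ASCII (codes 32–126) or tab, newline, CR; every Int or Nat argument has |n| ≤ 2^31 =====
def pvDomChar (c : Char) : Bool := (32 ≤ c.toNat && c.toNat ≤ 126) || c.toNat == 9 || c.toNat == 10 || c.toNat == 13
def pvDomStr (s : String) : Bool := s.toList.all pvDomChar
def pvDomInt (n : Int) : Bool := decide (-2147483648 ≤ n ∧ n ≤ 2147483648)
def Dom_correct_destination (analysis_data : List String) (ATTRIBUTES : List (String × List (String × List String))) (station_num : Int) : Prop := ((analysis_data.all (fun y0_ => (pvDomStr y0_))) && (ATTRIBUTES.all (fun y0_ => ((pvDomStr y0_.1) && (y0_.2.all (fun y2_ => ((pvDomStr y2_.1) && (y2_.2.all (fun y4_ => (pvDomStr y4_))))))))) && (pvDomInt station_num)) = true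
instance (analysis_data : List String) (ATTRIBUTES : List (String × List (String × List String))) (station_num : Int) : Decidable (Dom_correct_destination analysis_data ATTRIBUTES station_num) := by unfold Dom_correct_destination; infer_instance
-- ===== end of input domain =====

-- B replaces A's rescan of every station/property/value list per analysed factor by a reverse index
-- factor → stations built once, with one dict lookup per factor (objective: faster, asymptotic).

-- ===== PORT A =====
def correct_destination (analysis_data : List String) (ATTRIBUTES : List (String × List (String × List String))) (station_num : Int) : List Int :=
  let factor_list : List String :=
    analysis_data.foldl (fun acc factor =>
      (PySem.Dict.ofList ATTRIBUTES).items.foldl (fun acc sp =>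
        (PySem.Dict.ofList sp.2).keys.foldl (fun acc property =>
          if ((PySem.Dict.ofList sp.2).getD property []).contains factor then acc ++ [sp.1] else acc) acc) acc) []
  let station_counts := PySem.Dict.counter factor_list
  (PySem.List.pyRange 0 station_num 1).foldl (fun station_list i =>
      station_list ++ [station_counts.getD (PySem.List.pyGetD station_counts.keys i "") 0]) []

-- ===== PORT B =====
def correct_destination_alt (analysis_data : List String) (ATTRIBUTES : List (String × List (String × List String))) (station_num : Int) : List Int :=
  let index : PySem.Dict String (List String) :=
    (PySem.Dict.ofList ATTRIBUTES).items.foldl (fun ix sp =>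
      (PySem.Dict.ofList sp.2).values.foldl (fun ix vals =>
        (PySem.List.dedup vals).foldl (fun ix v => ix.modify v [] (· ++ [sp.1])) ix) ix)
      PySem.Dict.empty
  let totals : PySem.Dict String Int :=
    analysis_data.foldl (fun t factor =>
      (index.getD factor []).foldl (fun t station => t.insert station (t.getD station 0 + 1)) t)
      PySem.Dict.empty
  let counts := totals.values
  (PySem.List.pyRange 0 station_num 1).foldl (fun out i => out ++ [PySem.List.pyGetD counts i 0]) []

-- ===== PRECONDITION & SPEC =====
-- Pre_ excludes exactly the inputs on which both A and B raise IndexError: station_num larger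
-- than the number of stations having at least one property value occurring in analysis_data.
def Pre_correct_destination (analysis_data : List String) (ATTRIBUTES : List (String × List (String × List String))) (station_num : Int) : Prop :=
  station_num ≤ (((PySem.Dict.ofList ATTRIBUTES).items.filter (fun sp =>
      decide (∃ f ∈ analysis_data, ∃ p ∈ (PySem.Dict.ofList sp.2).keys,
        ((PySem.Dict.ofList sp.2).getD p []).contains f))).length : Int)
instance (analysis_data : List String) (ATTRIBUTES : List (String × List (String × List String))) (station_num : Int) : Decidable (Pre_correct_destination analysis_data ATTRIBUTES station_num) := by unfold Pre_correct_destination; infer_instance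
def pvWitness_correct_destination : List String × (List (String × List (String × List String))) × Int :=
  (["a", "b"], [("s1", [("p", ["a"])]), ("s2", [("q", ["c"])])], 1)

def Spec_correct_destination (analysis_data : List String) (ATTRIBUTES : List (String × List (String × List String))) (station_num : Int) (out : List Int) : Prop := out = correct_destination_alt analysis_data ATTRIBUTES station_num
instance (analysis_data : List String) (ATTRIBUTES : List (String × List (String × List String))) (station_num : Int) (out : List Int) : Decidable (Spec_correct_destination analysis_data ATTRIBUTES station_num out) := by unfold Spec_correct_destination; infer_instance

-- ===== CLAIM (what is proved, stated in full; the proofs are below) =====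
def Claim_equal_correct_destination : Prop := ∀ (analysis_data : List String) (ATTRIBUTES : List (String × List (String × List String))) (station_num : Int), Dom_correct_destination analysis_data ATTRIBUTES station_num → Pre_correct_destination analysis_data ATTRIBUTES station_num → Spec_correct_destination analysis_data ATTRIBUTES station_num (correct_destination analysis_data ATTRIBUTES station_num)

-- ===== LEMMAS AND PROOFS =====

-- the stations appended for one factor f, in order (A's inner two loops)
def blockOf (ATTRIBUTES : List (String × List (String × List String))) (f : String) : List String :=
  (PySem.Dict.ofList ATTRIBUTES).items.flatMap (fun sp =>
    ((PySem.Dict.ofList sp.2).keys.filter (fun p => ((PySem.Dict.ofList sp.2).getD p []).contains f)).map (fun _ => sp.1))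

-- A's full factor_list
def flOf (analysis_data : List String) (ATTRIBUTES : List (String × List (String × List String))) : List String :=
  analysis_data.flatMap (blockOf ATTRIBUTES)

theorem foldl_flatMap' {α β γ : Type} (g : α → List β) (F : γ → β → γ) :
    ∀ (l : List α) (init : γ), (l.flatMap g).foldl F init = l.foldl (fun acc x => (g x).foldl F acc) init := by
  intro l
  induction l with
  | nil => intro init; rfl
  | cons x xs ih => intro init; simp [List.flatMap_cons, List.foldl_append, ih]

theorem nodup_filter_beq {α : Type} [BEq α] [LawfulBEq α] :
    ∀ (l : List α), l.Nodup → ∀ x : α, l.filter (fun y => y == x) = if l.contains x then [x] else [] := by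
  intro l
  induction l with
  | nil => intro _ x; simp
  | cons a as ih =>
    intro hnd x
    simp only [List.nodup_cons] at hnd
    by_cases hax : a = x
    · subst hax
      have : as.contains a = false := by
        simp [List.contains_eq_mem]; exact hnd.1
      simp [List.filter_cons, this]
      intro y hy hya
      have := hnd.1
      exact absurd (hya ▸ hy) this
    · have hbeq : (a == x) = false := by simp [hax]
      simp only [List.filter_cons, hbeq, cond_false, ih hnd.2 x]
      by_cases hm : x ∈ as <;> simp [hm, List.contains_eq_mem, Ne.symm hax]

theorem flatMap_ite_singleton {α β : Type} (p : α → Bool) (c : β) :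
    ∀ (l : List α), l.flatMap (fun x => if p x then [c] else []) = (l.filter p).map (fun _ => c) := by
  intro l
  induction l with
  | nil => rfl
  | cons a as ih =>
    by_cases h : p a <;> simp [List.flatMap_cons, h, ih]

-- A's triple loop builds flOf
theorem factor_list_eq (analysis_data : List String) (ATTRIBUTES : List (String × List (String × List String))) :
    analysis_data.foldl (fun acc factor =>
      (PySem.Dict.ofList ATTRIBUTES).items.foldl (fun acc sp =>
        (PySem.Dict.ofList sp.2).keys.foldl (fun acc property =>
          if ((PySem.Dict.ofList sp.2).getD property []).contains factor then acc ++ [sp.1] else acc) acc) acc) []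
    = flOf analysis_data ATTRIBUTES := by
  unfold flOf blockOf
  simp only [PySem.List.foldl_append_if, PySem.List.foldl_append_eq_flatMap, List.nil_append]

theorem inner_vals (vals : List String) (s f : String) :
    (((PySem.List.dedup vals).map (fun v => (v, s))).filter (fun p => p.1 == f)).map (fun p => p.2)
    = if vals.contains f then [s] else [] := by
  rw [List.filter_map]
  have hc : ((fun (p : String × String) => p.1 == f) ∘ (fun v => (v, s))) = (fun v => v == f) := rfl
  rw [hc, nodup_filter_beq _ (PySem.List.nodup_dedup vals) f]
  have : (PySem.List.dedup vals).contains f = vals.contains f := by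
    simp [List.contains_eq_mem]
  rw [this]
  by_cases h : f ∈ vals <;> simp [h, List.contains_eq_mem]

theorem station_block (sp : String × List (String × List String)) (f : String) :
    ((((PySem.Dict.ofList sp.2).values.flatMap (fun vals =>
        (PySem.List.dedup vals).map (fun v => (v, sp.1)))).filter (fun p => p.1 == f)).map (fun p => p.2))
    = ((PySem.Dict.ofList sp.2).keys.filter (fun p => ((PySem.Dict.ofList sp.2).getD p []).contains f)).map (fun _ => sp.1) := by
  rw [List.filter_flatMap, List.map_flatMap]
  have h1 : ∀ vals : List String,
      (((PySem.List.dedup vals).map (fun v => (v, sp.1))).filter (fun p => p.1 == f)).map (fun p => p.2)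
      = if vals.contains f then [sp.1] else [] := fun vals => inner_vals vals sp.1 f
  calc (PySem.Dict.ofList sp.2).values.flatMap (fun vals =>
          (((PySem.List.dedup vals).map (fun v => (v, sp.1))).filter (fun p => p.1 == f)).map (fun p => p.2))
      = (PySem.Dict.ofList sp.2).values.flatMap (fun vals => if vals.contains f then [sp.1] else []) := by
        exact List.flatMap_congr (fun vals _ => h1 vals)
    _ = ((PySem.Dict.ofList sp.2).values.filter (fun vals => vals.contains f)).map (fun _ => sp.1) := by
        exact flatMap_ite_singleton _ _ _
    _ = ((PySem.Dict.ofList sp.2).keys.filter (fun p => ((PySem.Dict.ofList sp.2).getD p []).contains f)).map (fun _ => sp.1) := by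
        rw [PySem.Dict.values_eq_map_keys _ (PySem.Dict.nodup_keys_ofList _) ([] : List String), List.filter_map, List.map_map]
        rfl

-- B's index looks up blockOf
theorem index_getD_eq (ATTRIBUTES : List (String × List (String × List String))) (f : String) :
    ((PySem.Dict.ofList ATTRIBUTES).items.foldl (fun ix sp =>
      (PySem.Dict.ofList sp.2).values.foldl (fun ix vals =>
        (PySem.List.dedup vals).foldl (fun ix v => ix.modify v [] (· ++ [sp.1])) ix) ix)
      PySem.Dict.empty).getD f []
    = blockOf ATTRIBUTES f := by
  have hL : ((PySem.Dict.ofList ATTRIBUTES).items.flatMap (fun sp =>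
        (PySem.Dict.ofList sp.2).values.flatMap (fun vals =>
          (PySem.List.dedup vals).map (fun v => (v, sp.1))))).foldl
        (fun d (p : String × String) => d.modify p.1 [] (· ++ [p.2])) PySem.Dict.empty
      = (PySem.Dict.ofList ATTRIBUTES).items.foldl (fun ix sp =>
        (PySem.Dict.ofList sp.2).values.foldl (fun ix vals =>
          (PySem.List.dedup vals).foldl (fun ix v => ix.modify v [] (· ++ [sp.1])) ix) ix)
        PySem.Dict.empty := by
    simp only [foldl_flatMap', List.foldl_map]
  rw [← hL, PySem.Dict.getD_foldl_modify_append, PySem.Dict.getD_empty, List.nil_append,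
    List.filter_flatMap, List.map_flatMap]
  unfold blockOf
  exact List.flatMap_congr (fun sp _ => station_block sp f)

-- B's totals is the Counter of flOf
theorem totals_eq (analysis_data : List String) (ATTRIBUTES : List (String × List (String × List String))) :
    (analysis_data.foldl (fun t factor =>
      ((((PySem.Dict.ofList ATTRIBUTES).items.foldl (fun ix sp =>
        (PySem.Dict.ofList sp.2).values.foldl (fun ix vals =>
          (PySem.List.dedup vals).foldl (fun ix v => ix.modify v [] (· ++ [sp.1])) ix) ix)
        PySem.Dict.empty).getD factor [])).foldl (fun t station => t.insert station (t.getD station 0 + 1)) t)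
      PySem.Dict.empty)
    = PySem.Dict.counter (flOf analysis_data ATTRIBUTES) := by
  have hfun : (fun (t : PySem.Dict String Int) (factor : String) =>
      ((((PySem.Dict.ofList ATTRIBUTES).items.foldl (fun ix sp =>
        (PySem.Dict.ofList sp.2).values.foldl (fun ix vals =>
          (PySem.List.dedup vals).foldl (fun ix v => ix.modify v [] (· ++ [sp.1])) ix) ix)
        PySem.Dict.empty).getD factor [])).foldl (fun t station => t.insert station (t.getD station 0 + 1)) t)
      = (fun (t : PySem.Dict String Int) (factor : String) =>
        (blockOf ATTRIBUTES factor).foldl (fun t station => t.insert station (t.getD station 0 + 1)) t) := by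
    funext t factor
    rw [index_getD_eq]
  rw [hfun, ← foldl_flatMap']
  exact PySem.Dict.foldl_insert_getD_add_one_eq_counter _

-- length of the distinct-station list equals the matched-station count of Pre_
theorem keys_length_eq (analysis_data : List String) (ATTRIBUTES : List (String × List (String × List String))) :
    (PySem.Set.ofList (flOf analysis_data ATTRIBUTES)).length
    = ((PySem.Dict.ofList ATTRIBUTES).items.filter (fun sp =>
        decide (∃ f ∈ analysis_data, ∃ p ∈ (PySem.Dict.ofList sp.2).keys,
          ((PySem.Dict.ofList sp.2).getD p []).contains f))).length := by
  have hK : (PySem.Set.ofList (flOf analysis_data ATTRIBUTES)).Nodup := PySem.Set.nodup_ofList _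
  have hkeys : (PySem.Dict.ofList ATTRIBUTES).keys
      = (PySem.Dict.ofList ATTRIBUTES).items.map (fun sp => sp.1) := rfl
  have hM : (((PySem.Dict.ofList ATTRIBUTES).items.filter (fun sp =>
      decide (∃ f ∈ analysis_data, ∃ p ∈ (PySem.Dict.ofList sp.2).keys,
        ((PySem.Dict.ofList sp.2).getD p []).contains f))).map (fun sp => sp.1)).Nodup := by
    refine List.Nodup.sublist (List.Sublist.map _ (List.filter_sublist)) ?_
    rw [← hkeys]
    exact PySem.Dict.nodup_keys_ofList _
  have hmem : ∀ x, x ∈ PySem.Set.ofList (flOf analysis_data ATTRIBUTES) ↔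
      x ∈ ((PySem.Dict.ofList ATTRIBUTES).items.filter (fun sp =>
        decide (∃ f ∈ analysis_data, ∃ p ∈ (PySem.Dict.ofList sp.2).keys,
          ((PySem.Dict.ofList sp.2).getD p []).contains f))).map (fun sp => sp.1) := by
    intro x
    simp only [PySem.Set.mem_ofList, flOf, blockOf, List.mem_flatMap, List.mem_filter,
      List.mem_map, List.contains_eq_mem, decide_eq_true_eq]
    tauto
  have hperm := (List.perm_ext_iff_of_nodup hK hM).2 hmem
  have hlen := hperm.length_eq
  simpa using hlen

-- ===== VERDICT (by name: the statement is the Claim_ definition above) =====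
theorem correct_destination_spec : Claim_equal_correct_destination := by
  intro analysis_data ATTRIBUTES station_num _hdom hpre
  unfold Pre_correct_destination at hpre
  rw [← keys_length_eq analysis_data ATTRIBUTES] at hpre
  unfold Spec_correct_destination correct_destination correct_destination_alt
  simp only []
  rw [factor_list_eq, totals_eq]
  set FL := flOf analysis_data ATTRIBUTES with hFL
  set K := PySem.Set.ofList FL with hKdef
  have hn : station_num.toNat ≤ K.length := by omega
  -- left side: the output loop is a map over range
  rw [PySem.List.foldl_append_singleton_eq_map]
  simp only [List.nil_append, PySem.Dict.keys_counter, PySem.Dict.getD_counter]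
  -- right side: values of the counter
  have hvals : (PySem.Dict.counter FL).values = K.map (fun k => (FL.count k : Int)) := by
    simp [PySem.Dict.values, PySem.Dict.items_counter, List.map_map, Function.comp_def, hKdef]
  rw [hvals, PySem.List.foldl_append_singleton_eq_map]
  simp only [List.nil_append]
  rw [PySem.List.pyRange_one]
  simp only [sub_zero, zero_add, List.map_map]
  apply List.ext_getElem
  · simp
  · intro i h1 h2
    have hiK : i < K.length := by
      simp at h1; omega
    simp only [List.getElem_map, List.getElem_range, Function.comp_apply,
      PySem.List.pyGetD_natCast, List.getD_eq_getElem?_getD]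
    rw [← hKdef, List.getElem?_eq_getElem hiK, List.getElem?_map, List.getElem?_eq_getElem hiK]
    simp
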